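-- pv_equiv track=rewrite | github.com/KohlhaseJ/adventofcode2021 | day13/day13.py | joinMatrices
-- ===== SOURCE A (Python) =====
-- def joinMatrices(A, B):
--   joined = [[0 for _ in range(max(len(A[0]), len(B[0])))] for _ in range(max(len(A), len(B)))]
--   for i in range(len(joined)):
--     for j in range(len(joined[0])):
--       valueA = 0 if i >= len(A) or j >= len(A[0]) else A[i][j]
--       valueB = 0 if i >= len(B) or j >= len(B[0]) else B[i][j]
--       joined[i][j] = max(valueA, valueB)
--   return joined
-- ===== SOURCE B (Python) =====
-- def joinMatrices(A, B):
--   w = max(len(A[0]), len(B[0]))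
--   h = max(len(A), len(B))
--   padA = [row + [0] * (w - len(row)) for row in A] + [[0] * w] * (h - len(A))
--   padB = [row + [0] * (w - len(row)) for row in B] + [[0] * w] * (h - len(B))
--   return [[max(x, y) for x, y in zip(ra, rb)] for ra, rb in zip(padA, padB)]
-- ===== Notes on version B (the rewrite author's own statement) =====
-- stated objective: idiomatic
-- what changed: Replaces the index-range double loop with its per-element i>=len/j>=len guards and in-place mutation of a preallocated zero matrix by zero-padding both matrices once to the common shape and mapping max over zipped rows (no per-element bound checks or index arithmetic).
-- outside the precondition, e.g. on joinMatrices([[1], [2, 9]], [[0, 0]]): A returns [[1, 0], [2, 0]], B returns [[1, 0], [2, 9]]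
import Mathlib
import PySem

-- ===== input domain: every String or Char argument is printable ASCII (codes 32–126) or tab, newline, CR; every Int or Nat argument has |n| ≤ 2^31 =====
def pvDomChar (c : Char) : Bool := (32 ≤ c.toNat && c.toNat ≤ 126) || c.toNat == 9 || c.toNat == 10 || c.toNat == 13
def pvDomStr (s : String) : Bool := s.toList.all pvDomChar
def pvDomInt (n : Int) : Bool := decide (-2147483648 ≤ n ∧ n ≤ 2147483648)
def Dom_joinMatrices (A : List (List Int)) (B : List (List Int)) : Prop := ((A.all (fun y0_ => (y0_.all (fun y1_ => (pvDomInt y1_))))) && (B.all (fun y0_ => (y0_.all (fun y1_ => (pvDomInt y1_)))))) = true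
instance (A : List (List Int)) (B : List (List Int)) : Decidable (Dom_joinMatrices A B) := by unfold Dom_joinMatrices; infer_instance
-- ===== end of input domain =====

-- B pads both matrices to the common shape with zeros and maps max over zipped rows
-- instead of A's index-range double loop mutating a preallocated zero matrix.
-- Same asymptotic cost; equivalence is proved on nonempty rectangular matrices (Pre_).

-- ===== PORT A =====
-- guarded element access 'A[i][j]' of A's loop body (indices are in range under the guard)
def pvVal (M : List (List Int)) (i j : Nat) : Int :=
  if M.length ≤ i ∨ (M.headD []).length ≤ j then 0 else (M.getD i []).getD j 0

def joinMatrices (A : List (List Int)) (B : List (List Int)) : List (List Int) :=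
  let w := max (A.headD []).length (B.headD []).length
  let h := max A.length B.length
  let joined := (List.range h).map (fun _ => (List.range w).map (fun _ => (0 : Int)))
  (List.range h).foldl (fun M i =>
    (List.range w).foldl (fun M j =>
      M.set i ((M.getD i []).set j (max (pvVal A i j) (pvVal B i j)))) M) joined

-- ===== PORT B =====
def padRow (w : Nat) (r : List Int) : List Int := r ++ List.replicate (w - r.length) 0

def joinMatrices_alt (A : List (List Int)) (B : List (List Int)) : List (List Int) :=
  let w := max (A.headD []).length (B.headD []).length
  let h := max A.length B.length
  let padA := A.map (padRow w) ++ List.replicate (h - A.length) (List.replicate w 0)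
  let padB := B.map (padRow w) ++ List.replicate (h - B.length) (List.replicate w 0)
  (padA.zip padB).map (fun p => (p.1.zip p.2).map (fun q => max q.1 q.2))

-- ===== PRECONDITION & SPEC =====
-- Pre_ restricts to the natural domain of nonempty rectangular matrices: A raises
-- IndexError on empty A/B (A[0]) and on ragged rows shorter than the first row, and on
-- ragged rows longer than the first row A's silent first-row-width truncation is an
-- accident of its implementation.
def Pre_joinMatrices (A : List (List Int)) (B : List (List Int)) : Prop :=
  A ≠ [] ∧ B ≠ [] ∧ (∀ r ∈ A, r.length = (A.headD []).length)
    ∧ (∀ r ∈ B, r.length = (B.headD []).length)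
instance (A : List (List Int)) (B : List (List Int)) : Decidable (Pre_joinMatrices A B) := by
  unfold Pre_joinMatrices; infer_instance

def pvWitness_joinMatrices : List (List Int) × List (List Int) :=
  ([[1, 2], [3, 4]], [[5], [0], [7]])

def Spec_joinMatrices (A : List (List Int)) (B : List (List Int)) (out : List (List Int)) : Prop := out = joinMatrices_alt A B
instance (A : List (List Int)) (B : List (List Int)) (out : List (List Int)) : Decidable (Spec_joinMatrices A B out) := by unfold Spec_joinMatrices; infer_instance

-- ===== CLAIM (what is proved, stated in full; the proofs are below) =====
def Claim_equal_joinMatrices : Prop := ∀ (A : List (List Int)) (B : List (List Int)), Dom_joinMatrices A B → Pre_joinMatrices A B → Spec_joinMatrices A B (joinMatrices A B)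

-- ===== LEMMAS AND PROOFS =====

-- the common target: entry (i,j) is max (pvVal A i j) (pvVal B i j)
def pvTarget (A B : List (List Int)) : List (List Int) :=
  (List.range (max A.length B.length)).map (fun i =>
    (List.range (max (A.headD []).length (B.headD []).length)).map (fun j =>
      max (pvVal A i j) (pvVal B i j)))

-- inner loop: writing f j at index j for j < n turns a prefix of the row into a map
theorem pv_inner_fold (f : Nat → Int) :
    ∀ (n : Nat) (r : List Int), n ≤ r.length →
    (List.range n).foldl (fun r j => r.set j (f j)) r
      = (List.range n).map f ++ r.drop n := by
  intro n
  induction n with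
  | zero => simp
  | succ n ih =>
    intro r hn
    rw [List.range_succ, List.foldl_append, List.foldl_cons, List.foldl_nil,
        ih r (Nat.le_of_succ_le hn), List.map_append]
    have hlen : ((List.range n).map f).length = n := by simp
    rw [List.set_append, if_neg (by omega)]
    have hd : r.drop n = r[n] :: r.drop (n + 1) :=
      List.drop_eq_getElem_cons (by omega)
    simp only [hlen, Nat.sub_self]
    rw [hd, List.set_cons_zero, List.append_assoc]
    rfl

-- the inner matrix fold only touches row i
theorem pv_inner_mat (g : Nat → Int) (i : Nat) :
    ∀ (n : Nat) (M : List (List Int)), i < M.length →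
    (List.range n).foldl (fun M j => M.set i ((M.getD i []).set j (g j))) M
      = M.set i ((List.range n).foldl (fun r j => r.set j (g j)) (M.getD i [])) := by
  intro n
  induction n with
  | zero =>
    intro M hM
    simp only [List.range_zero, List.foldl_nil]
    rw [List.getD_eq_getElem?_getD, List.getElem?_eq_getElem hM]
    simp [List.set_getElem_self]
  | succ n ih =>
    intro M hM
    rw [List.range_succ, List.foldl_append, List.foldl_cons, List.foldl_nil, ih M hM]
    have h1 : (M.set i ((List.range n).foldl (fun r j => r.set j (g j)) (M.getD i []))).getD i []
        = (List.range n).foldl (fun r j => r.set j (g j)) (M.getD i []) := by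
      rw [List.getD_eq_getElem?_getD, List.getElem?_set_self (by simpa using hM)]
      rfl
    rw [h1, List.set_set, List.foldl_append, List.foldl_cons, List.foldl_nil]

-- one outer iteration: row i (of length w) becomes the mapped row
theorem pv_step (g : Nat → Int) (w : Nat) (M : List (List Int)) (i : Nat)
    (hi : i < M.length) (hlen : (M.getD i []).length = w) :
    (List.range w).foldl (fun M j => M.set i ((M.getD i []).set j (g j))) M
      = M.set i ((List.range w).map g) := by
  rw [pv_inner_mat g i w M hi, pv_inner_fold g w _ (le_of_eq hlen.symm)]
  rw [List.getD_eq_getElem?_getD] at hlen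
  rw [List.getD_eq_getElem?_getD, List.drop_of_length_le hlen.le, List.append_nil]

-- outer loop: the double fold writes the mapped row at every i < n
theorem pv_outer (v : Nat → Nat → Int) (w : Nat) :
    ∀ (n : Nat) (M : List (List Int)), n ≤ M.length → (∀ r ∈ M, r.length = w) →
    (List.range n).foldl (fun M i =>
        (List.range w).foldl (fun M j => M.set i ((M.getD i []).set j (v i j))) M) M
      = (List.range n).map (fun i => (List.range w).map (v i)) ++ M.drop n := by
  intro n
  induction n with
  | zero => simp
  | succ n ih =>
    intro M hn hM
    rw [List.range_succ, List.foldl_append, List.foldl_cons, List.foldl_nil,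
        ih M (Nat.le_of_succ_le hn) hM, List.map_append]
    have hlen : ((List.range n).map (fun i => (List.range w).map (v i))).length = n := by simp
    have hd : M.drop n = M[n] :: M.drop (n + 1) :=
      List.drop_eq_getElem_cons (by omega)
    have hrow : (((List.range n).map (fun i => (List.range w).map (v i)) ++ M.drop n).getD n [])
        = M[n] := by
      rw [List.getD_eq_getElem?_getD, List.getElem?_append_right hlen.le]
      simp only [hlen, Nat.sub_self]
      rw [hd]
      rfl
    have hw : M[n].length = w := hM _ (List.getElem_mem _)
    have hi : n < ((List.range n).map (fun i => (List.range w).map (v i)) ++ M.drop n).length := by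
      rw [List.length_append, hlen, List.length_drop]; omega
    rw [pv_step (v n) w _ n hi (by rw [hrow]; exact hw)]
    rw [List.set_append, if_neg (by omega)]
    simp only [hlen, Nat.sub_self]
    rw [hd, List.set_cons_zero, List.append_assoc]
    rfl

theorem pv_portA_eq_target (A B : List (List Int)) :
    joinMatrices A B = pvTarget A B := by
  unfold joinMatrices pvTarget
  have hlen : ((List.range (max A.length B.length)).map
      (fun _ => (List.range (max (A.headD []).length (B.headD []).length)).map
        (fun _ => (0 : Int)))).length = max A.length B.length := by simp
  rw [pv_outer (fun i j => max (pvVal A i j) (pvVal B i j))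
      (max (A.headD []).length (B.headD []).length)
      (max A.length B.length) _ (le_of_eq hlen.symm)
      (by intro r hr; rcases List.mem_map.mp hr with ⟨_, _, rfl⟩; simp)]
  rw [List.drop_of_length_le (le_of_eq hlen), List.append_nil]

-- a padded row of X, read at row index i, is exactly the mapped guarded-access row
theorem pv_pad_row (X : List (List Int)) (w h : Nat)
    (hrect : ∀ r ∈ X, r.length = (X.headD []).length)
    (hwa : (X.headD []).length ≤ w) (hX : X.length ≤ h) (i : Nat) (hi : i < h) :
    (X.map (padRow w) ++ List.replicate (h - X.length) (List.replicate w 0)).getD i []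
      = (List.range w).map (fun j => pvVal X i j) := by
  by_cases hiX : i < X.length
  · rw [List.getD_append _ _ _ _ (by simpa using hiX), List.getD_eq_getElem _ _ (by simpa using hiX)]
    rw [List.getElem_map]
    have hXi : X[i].length = (X.headD []).length := hrect _ (List.getElem_mem _)
    have hwa' : X[i].length ≤ w := by rw [hXi]; exact hwa
    apply List.ext_getElem
    · simp [padRow]; omega
    · intro j hj1 hj2
      rw [List.getElem_map, List.getElem_range]
      unfold padRow pvVal
      by_cases hja : j < X[i].length
      · rw [List.getElem_append_left hja,
            if_neg (by simp only [not_or, not_le]; exact ⟨hiX, by rw [← hXi]; omega⟩),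
            List.getD_eq_getElem _ _ hiX, List.getD_eq_getElem _ _ hja]
      · rw [List.getElem_append_right (Nat.le_of_not_lt hja), List.getElem_replicate,
            if_pos (Or.inr (by rw [← hXi]; omega))]
  · rw [List.getD_append_right _ _ _ _ (by simpa using Nat.le_of_not_lt hiX)]
    have : (X.map (padRow w)).length = X.length := by simp
    rw [this]
    rw [List.getD_eq_getElem _ _ (by simp; omega), List.getElem_replicate]
    apply List.ext_getElem
    · simp
    · intro j hj1 hj2
      rw [List.getElem_replicate, List.getElem_map, List.getElem_range]
      unfold pvVal
      rw [if_pos (Or.inl (Nat.le_of_not_lt hiX))]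

theorem pv_portB_eq_target (A B : List (List Int)) (h : Pre_joinMatrices A B) :
    joinMatrices_alt A B = pvTarget A B := by
  obtain ⟨hA, hB, hra, hrb⟩ := h
  unfold joinMatrices_alt pvTarget
  set w := max (A.headD []).length (B.headD []).length with hw
  set h' := max A.length B.length with hh
  have hlenA : (A.map (padRow w) ++ List.replicate (h' - A.length) (List.replicate w 0)).length = h' := by
    simp; omega
  have hlenB : (B.map (padRow w) ++ List.replicate (h' - B.length) (List.replicate w 0)).length = h' := by
    simp; omega
  apply List.ext_getElem
  · simp [hlenA, hlenB]
  · intro i hi1 hi2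
    have hih : i < h' := by simpa using hi2
    rw [List.getElem_map, List.getElem_zip, List.getElem_map, List.getElem_range]
    rw [← List.getD_eq_getElem _ [] (by rw [hlenA]; exact hih),
        ← List.getD_eq_getElem _ [] (by rw [hlenB]; exact hih)]
    rw [pv_pad_row A w h' hra (le_max_left _ _) (le_max_left _ _) i hih,
        pv_pad_row B w h' hrb (le_max_right _ _) (le_max_right _ _) i hih]
    rw [List.zip_map', List.map_map]
    rfl

-- ===== VERDICT (by name: the statement is the Claim_ definition above) =====
theorem joinMatrices_spec : Claim_equal_joinMatrices := by
  intro A B _ hpre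
  unfold Spec_joinMatrices
  rw [pv_portA_eq_target A B, pv_portB_eq_target A B hpre]
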